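-- pv_equiv track=rewrite | github.com/Tomas-Tamantini/advent-of-code-python | models/aoc_2023/a2023_d13/parser.py | _contiguous_lines
-- ===== SOURCE A (Python) =====
-- from typing import Iterator, Iterable
--
-- def _contiguous_lines(lines: Iterable[str]) -> Iterator[str]:
--     current_str = ""
--     for line in lines:
--         if line:
--             current_str += "\n" + line
--         else:
--             if current_str:
--                 yield current_str
--                 current_str = ""
--     if current_str:
--         yield current_str
-- ===== SOURCE B (Python) =====
-- from itertools import groupby
-- from typing import Iterator, Iterable
--
-- def _contiguous_lines(lines: Iterable[str]) -> Iterator[str]: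
--     for nonblank, group in groupby(lines, key=bool):
--         if nonblank:
--             yield "\n" + "\n".join(group)
-- ===== Notes on version B (the rewrite author's own statement) =====
-- stated objective: idiomatic
-- what changed: Replaces A's stateful accumulate-and-flush loop (current_str grown line by line, flushed on blanks and at the end) with itertools.groupby(lines, key=bool): split into maximal runs of truthy/falsy lines, skip blank runs, and yield '\n' + '\n'.join(group) per non-blank run.
import Mathlib
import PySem

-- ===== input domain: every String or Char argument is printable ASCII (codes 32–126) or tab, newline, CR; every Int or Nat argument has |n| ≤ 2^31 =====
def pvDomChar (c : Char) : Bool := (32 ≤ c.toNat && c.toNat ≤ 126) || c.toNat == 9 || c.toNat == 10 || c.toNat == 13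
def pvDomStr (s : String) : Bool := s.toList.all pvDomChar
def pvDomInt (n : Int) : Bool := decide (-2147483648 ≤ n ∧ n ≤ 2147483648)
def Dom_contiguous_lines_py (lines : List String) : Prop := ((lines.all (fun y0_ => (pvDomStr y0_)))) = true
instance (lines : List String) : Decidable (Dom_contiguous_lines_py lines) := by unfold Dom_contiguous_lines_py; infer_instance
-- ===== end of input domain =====

-- B replaces A's stateful accumulate-and-flush loop by an itertools.groupby decomposition
-- (group maximal runs by bool(line), map over the non-blank groups); objective: idiomatic.

-- ===== PORT A =====
-- the loop of _contiguous_lines: state current_str (as List Char), yields collected in order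
def contiguousLinesLoop (cur : List Char) (lines : List String) : List String :=
  match lines with
  | [] => if cur ≠ [] then [String.ofList cur] else []
  | l :: ls =>
    if l ≠ "" then contiguousLinesLoop (cur ++ '\n' :: l.toList) ls
    else if cur ≠ [] then String.ofList cur :: contiguousLinesLoop [] ls
    else contiguousLinesLoop [] ls

def contiguous_lines_py (lines : List String) : List String :=
  contiguousLinesLoop [] lines

-- ===== PORT B =====
-- itertools.groupby(lines, key=bool): maximal runs of lines with equal truthiness
def pvGroupByBool (ls : List String) : List (Bool × List String) :=
  match ls with
  | [] => []
  | x :: xs =>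
    let k : Bool := x != ""
    (k, x :: xs.takeWhile (fun y => (y != "") == k)) ::
      pvGroupByBool (xs.dropWhile (fun y => (y != "") == k))
termination_by ls.length
decreasing_by
  simp only [List.length_cons]
  exact Nat.lt_succ_of_le (List.length_dropWhile_le _ _)

-- skip blank groups; each non-blank group yields "\n" + "\n".join(group)
def contiguous_lines_py_alt (lines : List String) : List String :=
  (pvGroupByBool lines).filterMap (fun g =>
    if g.1 then some (String.ofList ('\n' :: PySem.Chars.join ['\n'] (g.2.map String.toList)))
    else none)

-- ===== PRECONDITION & SPEC =====
def Spec_contiguous_lines_py (lines : List String) (out : List String) : Prop := out = contiguous_lines_py_alt lines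
instance (lines : List String) (out : List String) : Decidable (Spec_contiguous_lines_py lines out) := by unfold Spec_contiguous_lines_py; infer_instance

-- ===== CLAIM (what is proved, stated in full; the proofs are below) =====
def Claim_equal_contiguous_lines_py : Prop := ∀ (lines : List String), Dom_contiguous_lines_py lines → Spec_contiguous_lines_py lines (contiguous_lines_py lines)

-- ===== LEMMAS AND PROOFS =====

-- skipping a run of blank lines with empty accumulator changes nothing
theorem loop_skip_blanks (run rest : List String) (h : ∀ y ∈ run, y = "") :
    contiguousLinesLoop [] (run ++ rest) = contiguousLinesLoop [] rest := by
  induction run with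
  | nil => rfl
  | cons y t ih =>
    have hy : y = "" := h y (by simp)
    subst hy
    simp only [List.cons_append, contiguousLinesLoop]
    exact ih (fun z hz => h z (by simp [hz]))

-- consuming a run of non-blank lines accumulates "\n"-prefixed pieces
theorem loop_consume_run (run : List String) (h : ∀ y ∈ run, y ≠ "") :
    ∀ (cur : List Char) (rest : List String), cur ≠ [] →
    contiguousLinesLoop cur (run ++ rest)
      = contiguousLinesLoop (cur ++ run.flatMap (fun y => '\n' :: y.toList)) rest := by
  induction run with
  | nil => intro cur rest _; simp
  | cons y t ih =>
    intro cur rest hcur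
    have hy : y ≠ "" := h y (by simp)
    simp only [List.cons_append, contiguousLinesLoop, if_pos hy]
    rw [ih (fun z hz => h z (by simp [hz])) _ rest (by simp)]
    simp

-- "\n" + "\n".join(x :: run) over char lists, as the accumulated string
theorem join_run (x : String) (run : List String) :
    '\n' :: PySem.Chars.join ['\n'] ((x :: run).map String.toList)
      = '\n' :: x.toList ++ run.flatMap (fun y => '\n' :: y.toList) := by
  induction run generalizing x with
  | nil => simp [PySem.Chars.join, List.intercalate]
  | cons y t ih =>
    simp only [List.map_cons] at *
    rw [PySem.Chars.join_cons_cons]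
    have h2 := ih y
    simp only [List.flatMap_cons, List.cons_append]
    rw [List.append_assoc]
    congr 1
    simpa using h2

-- after a finished block, a rest starting blank (or empty) yields the block then recurses
theorem loop_flush (cur : List Char) (hcur : cur ≠ []) (rest : List String)
    (hrest : rest = [] ∨ ∃ t, rest = "" :: t) :
    contiguousLinesLoop cur rest = String.ofList cur :: contiguousLinesLoop [] rest := by
  rcases hrest with h | ⟨t, h⟩ <;> subst h <;> simp [contiguousLinesLoop, hcur]

theorem alt_nil : contiguous_lines_py_alt [] = [] := by
  simp [contiguous_lines_py_alt, pvGroupByBool]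

theorem alt_cons_blank (xs : List String) :
    contiguous_lines_py_alt ("" :: xs)
      = contiguous_lines_py_alt (xs.dropWhile (fun y => (y != "") == ("" != ""))) := by
  simp only [contiguous_lines_py_alt]
  rw [pvGroupByBool.eq_def]
  simp

theorem alt_cons_nonblank (x : String) (xs : List String) (hx : x ≠ "") :
    contiguous_lines_py_alt (x :: xs)
      = String.ofList ('\n' :: PySem.Chars.join ['\n']
            ((x :: xs.takeWhile (fun y => (y != "") == (x != ""))).map String.toList))
        :: contiguous_lines_py_alt (xs.dropWhile (fun y => (y != "") == (x != ""))) := by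
  simp only [contiguous_lines_py_alt]
  rw [pvGroupByBool.eq_def]
  simp [hx]

theorem main_eq : ∀ (n : ℕ) (ls : List String), ls.length ≤ n →
    contiguousLinesLoop [] ls = contiguous_lines_py_alt ls := by
  intro n
  induction n with
  | zero =>
    intro ls h
    have : ls = [] := List.eq_nil_of_length_eq_zero (Nat.le_zero.mp h)
    subst this
    rw [alt_nil]; rfl
  | succ n ih =>
    intro ls hlen
    match ls with
    | [] => rw [alt_nil]; rfl
    | x :: xs =>
      by_cases hx : x = ""
      · -- blank group: both sides skip it
        subst hx
        obtain ⟨run, rest, hrun, hrest⟩ :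
            ∃ run rest, run = xs.takeWhile (fun y => (y != "") == ("" != "")) ∧
              rest = xs.dropWhile (fun y => (y != "") == ("" != "")) := ⟨_, _, rfl, rfl⟩
        have hsplit : xs = run ++ rest := by
          rw [hrun, hrest, List.takeWhile_append_dropWhile]
        have hall : ∀ y ∈ run, y = "" := by
          intro y hy
          have := List.mem_takeWhile_imp (hrun ▸ hy)
          simpa using this
        have hlenrest : rest.length ≤ n := by
          have h1 := List.length_dropWhile_le (fun y => (y != "") == ("" != "")) xs
          rw [← hrest] at h1
          simp only [List.length_cons] at hlen
          omega
        have l1 : contiguousLinesLoop [] ("" :: xs) = contiguousLinesLoop [] xs := by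
          simp [contiguousLinesLoop]
        rw [l1, hsplit, loop_skip_blanks run rest hall, ih rest hlenrest,
          alt_cons_blank, ← hsplit, ← hrest]
      · -- non-blank group
        obtain ⟨run, rest, hrun, hrest⟩ :
            ∃ run rest, run = xs.takeWhile (fun y => (y != "") == (x != "")) ∧
              rest = xs.dropWhile (fun y => (y != "") == (x != "")) := ⟨_, _, rfl, rfl⟩
        have hkx : (x != "") = true := by simpa using hx
        have hsplit : xs = run ++ rest := by
          rw [hrun, hrest, List.takeWhile_append_dropWhile]
        have hall : ∀ y ∈ run, y ≠ "" := by
          intro y hy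
          have := List.mem_takeWhile_imp (hrun ▸ hy)
          rw [hkx] at this
          simpa using this
        have hlenrest : rest.length ≤ n := by
          have h1 := List.length_dropWhile_le (fun y => (y != "") == (x != "")) xs
          rw [← hrest] at h1
          simp only [List.length_cons] at hlen
          omega
        have hrestshape : rest = [] ∨ ∃ t, rest = "" :: t := by
          cases hrv : rest with
          | nil => exact Or.inl rfl
          | cons r t =>
            right
            refine ⟨t, ?_⟩
            have hhead := List.head?_dropWhile_not (fun y => (y != "") == (x != "")) xs
            rw [← hrest, hrv] at hhead
            simp only [List.head?_cons] at hhead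
            rw [hkx] at hhead
            have hr0 : r = "" := by simpa using hhead
            rw [hr0]
        have hcur : ('\n' :: x.toList : List Char) ≠ [] := by simp
        have step1 : contiguousLinesLoop [] (x :: xs)
            = contiguousLinesLoop ('\n' :: x.toList) xs := by
          simp [contiguousLinesLoop, hx]
        have step2 : contiguousLinesLoop ('\n' :: x.toList) xs
            = contiguousLinesLoop ('\n' :: x.toList ++ run.flatMap (fun y => '\n' :: y.toList)) rest := by
          rw [hsplit]; exact loop_consume_run run hall _ rest hcur
        have hC : ('\n' :: x.toList ++ run.flatMap (fun y => '\n' :: y.toList) : List Char) ≠ [] := by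
          simp
        rw [step1, step2, loop_flush _ hC rest hrestshape, ih rest hlenrest,
          alt_cons_nonblank x xs hx, ← hrun, ← hrest, join_run]

-- ===== VERDICT (by name: the statement is the Claim_ definition above) =====
theorem contiguous_lines_py_spec : Claim_equal_contiguous_lines_py := by
  intro lines _
  unfold Spec_contiguous_lines_py contiguous_lines_py
  exact main_eq lines.length lines le_rfl
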